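-- pv_equiv track=rewrite | github.com/ScratchyCode/fx-CG50 | Crittografia/NotAES.py | inverse_transpose_blocks
-- ===== SOURCE A (Python) =====
-- def ordina_chiave(num_colonne, chiave):
--     lista = [(chiave[i], i) for i in range(num_colonne)]
--     lista.sort(key=lambda x: x[0])
--     return [item[1] for item in lista]
--
-- def inverse_transpose_blocks(blocks, chiave):
--     if not chiave:
--         return blocks[:]
--     num_col = len(chiave)
--     num_rows = len(blocks) // num_col
--     ordine = ordina_chiave(num_col, chiave)
--     result = [None] * (num_rows * num_col)
--     idx_cifrato = 0
--     for col in ordine: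
--         for r in range(num_rows):
--             orig_idx = r * num_col + col
--             result[orig_idx] = blocks[idx_cifrato]
--             idx_cifrato += 1
--     return result
-- ===== SOURCE B (Python) =====
-- def inverse_transpose_blocks(blocks, chiave):
--     if not chiave:
--         return blocks[:]
--     num_col = len(chiave)
--     num_rows = len(blocks) // num_col
--     ordine = [i for _, i in sorted([(chiave[i], i) for i in range(num_col)], key=lambda p: p[0])]
--     grid = [None] * num_col
--     for j, col in enumerate(ordine):
--         grid[col] = blocks[j * num_rows:(j + 1) * num_rows]
--     return [grid[col][r] for r in range(num_rows) for col in range(num_col)]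
-- ===== Notes on version B (the rewrite author's own statement) =====
-- stated objective: alternative
-- what changed: Instead of A's counter-driven scattered writes into a flat preallocated result (result[r*num_col+col] = blocks[idx++]), B slices the ciphertext into num_col contiguous chunks of num_rows, scatters the chunks into a column-indexed grid, and reads the grid back row-major with a flat comprehension.
import Mathlib
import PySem

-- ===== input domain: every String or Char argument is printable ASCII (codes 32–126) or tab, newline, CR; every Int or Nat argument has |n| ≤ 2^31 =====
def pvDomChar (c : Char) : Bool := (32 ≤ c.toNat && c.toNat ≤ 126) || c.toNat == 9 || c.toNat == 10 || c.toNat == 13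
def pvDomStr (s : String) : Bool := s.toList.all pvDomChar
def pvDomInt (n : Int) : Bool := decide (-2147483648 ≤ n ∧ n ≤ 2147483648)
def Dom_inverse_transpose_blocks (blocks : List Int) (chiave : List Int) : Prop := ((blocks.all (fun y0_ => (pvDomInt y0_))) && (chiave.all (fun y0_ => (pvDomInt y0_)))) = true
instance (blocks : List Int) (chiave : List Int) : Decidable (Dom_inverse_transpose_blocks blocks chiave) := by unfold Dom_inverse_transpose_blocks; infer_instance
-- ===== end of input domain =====

-- B replaces A's counter-driven scattered writes into a flat preallocated list by slicing the
-- ciphertext into per-column chunks, scattering the chunks into a column-indexed grid, and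
-- reading the grid back row-major (objective: alternative decomposition, same cost).

-- ===== PORT A =====
-- helper ordina_chiave; loop indices are Nats (Python's range yields 0,1,2,…, all nonnegative),
-- chiave[i] is exact as getD since i < len(chiave) at every use.
def ordina_chiave (num_colonne : Nat) (chiave : List Int) : List Nat :=
  let lista := (List.range num_colonne).map (fun i => (chiave.getD i 0, i))
  let lista := PySem.List.sorted lista Prod.fst
  lista.map Prod.snd

-- [None] * (num_rows*num_col) is replicate … 0: every cell is overwritten before the return, so the
-- placeholder value never appears; blocks[idx_cifrato] is exact as getD since idx_cifrato stays < len(blocks).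
def inverse_transpose_blocks (blocks : List Int) (chiave : List Int) : List Int :=
  if chiave = [] then blocks
  else
    let num_col := chiave.length
    let num_rows := blocks.length / num_col
    let ordine := ordina_chiave num_col chiave
    let init : List Int := List.replicate (num_rows * num_col) 0
    (ordine.foldl
      (fun (acc : List Int × Nat) col =>
        (List.range num_rows).foldl
          (fun (acc : List Int × Nat) r =>
            (acc.1.set (r * num_col + col) (blocks.getD acc.2 0), acc.2 + 1))
          acc)
      (init, 0)).1

-- ===== PORT B =====
-- [None] * num_col is replicate … []: every grid cell is overwritten (ordine covers all columns);
-- grid[col][r] is exact as getD since each chunk has num_rows elements.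
def inverse_transpose_blocks_alt (blocks : List Int) (chiave : List Int) : List Int :=
  if chiave = [] then blocks
  else
    let num_col := chiave.length
    let num_rows := blocks.length / num_col
    let ordine := (PySem.List.sorted ((List.range num_col).map (fun i => (chiave.getD i 0, i))) Prod.fst).map Prod.snd
    let grid := (PySem.List.enumerate ordine).foldl
      (fun (g : List (List Int)) jc =>
        g.set jc.2 (PySem.List.slice blocks (some (jc.1 * (num_rows : Int))) (some ((jc.1 + 1) * (num_rows : Int)))))
      (List.replicate num_col ([] : List Int))
    (List.range num_rows).flatMap (fun r => (List.range num_col).map (fun col => (grid.getD col []).getD r 0))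

-- ===== PRECONDITION & SPEC =====
def Spec_inverse_transpose_blocks (blocks : List Int) (chiave : List Int) (out : List Int) : Prop := out = inverse_transpose_blocks_alt blocks chiave
instance (blocks : List Int) (chiave : List Int) (out : List Int) : Decidable (Spec_inverse_transpose_blocks blocks chiave out) := by unfold Spec_inverse_transpose_blocks; infer_instance

-- ===== CLAIM (what is proved, stated in full; the proofs are below) =====
def Claim_equal_inverse_transpose_blocks : Prop := ∀ (blocks : List Int) (chiave : List Int), Dom_inverse_transpose_blocks blocks chiave → Spec_inverse_transpose_blocks blocks chiave (inverse_transpose_blocks blocks chiave)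

-- ===== LEMMAS AND PROOFS =====

-- ordine is a permutation of range num_colonne
lemma ordina_perm (n : Nat) (chiave : List Int) :
    (ordina_chiave n chiave).Perm (List.range n) := by
  unfold ordina_chiave
  have h := (PySem.List.sorted_perm ((List.range n).map (fun i => (chiave.getD i 0, i))) Prod.fst false).map Prod.snd
  simpa [List.map_map, Function.comp_def] using h

lemma ordina_nodup (n : Nat) (chiave : List Int) :
    (ordina_chiave n chiave).Nodup :=
  (List.nodup_range).perm (ordina_perm n chiave).symm

lemma ordina_mem (n : Nat) (chiave : List Int) {c : Nat} (h : c ∈ ordina_chiave n chiave) :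
    c < n := by
  have := (ordina_perm n chiave).mem_iff.mp h
  simpa using this

-- generic scatter (foldl of List.set) lemmas
lemma foldl_set_length {α : Type} (L : List (Nat × α)) (init : List α) :
    (L.foldl (fun acc p => acc.set p.1 p.2) init).length = init.length := by
  induction L generalizing init with
  | nil => rfl
  | cons p L ih => simp [List.foldl_cons, ih]

lemma foldl_set_getD_not_mem {α : Type} (L : List (Nat × α)) (init : List α) (d : α) (q : Nat)
    (h : q ∉ L.map Prod.fst) :
    (L.foldl (fun acc p => acc.set p.1 p.2) init).getD q d = init.getD q d := by
  induction L generalizing init with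
  | nil => rfl
  | cons p L ih =>
    simp only [List.map_cons, List.mem_cons, not_or] at h
    rw [List.foldl_cons, ih _ h.2, List.getD, List.getD,
        List.getElem?_set_ne (Ne.symm h.1)]

lemma foldl_set_getD_mem {α : Type} (L : List (Nat × α)) (init : List α) (d : α) (q : Nat) (v : α)
    (hmem : (q, v) ∈ L) (hnodup : (L.map Prod.fst).Nodup) (hq : q < init.length) :
    (L.foldl (fun acc p => acc.set p.1 p.2) init).getD q d = v := by
  induction L generalizing init with
  | nil => cases hmem
  | cons p L ih =>
    simp only [List.map_cons, List.nodup_cons] at hnodup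
    rcases List.mem_cons.mp hmem with h | h
    · subst h
      rw [List.foldl_cons, foldl_set_getD_not_mem _ _ _ _ hnodup.1, List.getD,
          List.getElem?_set_self (by simpa using hq)]
      rfl
    · have hne : p.1 ≠ q := by
        intro hEq
        exact hnodup.1 (hEq ▸ (List.mem_map.mpr ⟨(q, v), h, rfl⟩))
      rw [List.foldl_cons]
      exact ih _ h hnodup.2 (by simpa using hq)

-- the list of (position, value) writes A performs, per column, starting at block-chunk k
def innerW (blocks : List Int) (n m k c : Nat) : List (Nat × Int) :=
  (List.range m).map (fun r => (r * n + c, blocks.getD (k * m + r) 0))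

def writesFrom (blocks : List Int) (n m : Nat) : Nat → List Nat → List (Nat × Int)
  | _, [] => []
  | k, c :: cs => innerW blocks n m k c ++ writesFrom blocks n m (k + 1) cs

lemma inner_fold (blocks : List Int) (n m c : Nat) (res : List Int) (idx : Nat) :
    (List.range m).foldl
      (fun (acc : List Int × Nat) r => (acc.1.set (r * n + c) (blocks.getD acc.2 0), acc.2 + 1))
      (res, idx)
    = (((List.range m).map (fun r => (r * n + c, blocks.getD (idx + r) 0))).foldl
        (fun acc p => acc.set p.1 p.2) res, idx + m) := by
  induction m generalizing res idx with
  | zero => simp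
  | succ m ih =>
    rw [List.range_succ, List.foldl_append, List.map_append, List.foldl_append, ih]
    rfl

lemma outer_fold (blocks : List Int) (n m : Nat) (ord : List Nat) :
    ∀ (k : Nat) (res : List Int),
    (ord.foldl
      (fun (acc : List Int × Nat) col =>
        (List.range m).foldl
          (fun (acc : List Int × Nat) r => (acc.1.set (r * n + col) (blocks.getD acc.2 0), acc.2 + 1))
          acc)
      (res, k * m))
    = ((writesFrom blocks n m k ord).foldl (fun acc p => acc.set p.1 p.2) res, (k + ord.length) * m) := by
  induction ord with
  | nil => intro k res; simp [writesFrom]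
  | cons c cs ih =>
    intro k res
    rw [List.foldl_cons, inner_fold]
    have hk : k * m + m = (k + 1) * m := by ring
    rw [hk, ih (k + 1)]
    simp only [writesFrom, innerW, List.foldl_append, List.length_cons]
    have h2 : k + 1 + cs.length = k + (cs.length + 1) := by omega
    rw [h2]

lemma map_fst_writesFrom (blocks : List Int) (n m : Nat) :
    ∀ (k : Nat) (cs : List Nat),
    (writesFrom blocks n m k cs).map Prod.fst
      = cs.flatMap (fun c => (List.range m).map (fun r => r * n + c)) := by
  intro k cs
  induction cs generalizing k with
  | nil => simp [writesFrom]
  | cons c cs ih => simp [writesFrom, innerW, List.map_map, Function.comp, ih]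

lemma nodup_fsts (n m : Nat) (hn : 0 < n) :
    ∀ (cs : List Nat), cs.Nodup → (∀ c ∈ cs, c < n) →
    (cs.flatMap (fun c => (List.range m).map (fun r => r * n + c))).Nodup := by
  intro cs hnd hlt
  induction cs with
  | nil => simp
  | cons c cs ih =>
    simp only [List.nodup_cons] at hnd
    rw [List.flatMap_cons]
    refine List.Nodup.append ?_ (ih hnd.2 (fun x hx => hlt x (List.mem_cons_of_mem _ hx))) ?_
    · refine List.Nodup.map ?_ (List.nodup_range)
      intro a b hab
      have hab' : a * n + c = b * n + c := hab
      exact Nat.eq_of_mul_eq_mul_right hn (Nat.add_right_cancel hab')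
    · intro q hq1 hq2
      have hc : c < n := hlt c (List.mem_cons_self)
      rcases List.mem_map.mp hq1 with ⟨r, _, rfl⟩
      rcases List.mem_flatMap.mp hq2 with ⟨c', hc', hq2'⟩
      rcases List.mem_map.mp hq2' with ⟨r', _, hEq⟩
      have hc'n : c' < n := hlt c' (List.mem_cons_of_mem _ hc')
      have h1 : (r * n + c) % n = c := by
        rw [Nat.add_comm, Nat.add_mul_mod_self_right, Nat.mod_eq_of_lt hc]
      have h2 : (r' * n + c') % n = c' := by
        rw [Nat.add_comm, Nat.add_mul_mod_self_right, Nat.mod_eq_of_lt hc'n]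
      have : c = c' := by rw [← h1, ← hEq, h2]
      exact hnd.1 (this ▸ hc')

lemma mem_writesFrom (blocks : List Int) (n m : Nat) :
    ∀ (cs : List Nat) (k j r : Nat) (hj : j < cs.length), r < m →
    (r * n + cs[j], blocks.getD ((k + j) * m + r) 0) ∈ writesFrom blocks n m k cs := by
  intro cs
  induction cs with
  | nil => intro k j r hj; exact absurd hj (by simp)
  | cons c cs ih =>
    intro k j r hj hr
    cases j with
    | zero =>
      apply List.mem_append_left
      exact List.mem_map.mpr ⟨r, List.mem_range.mpr hr, by simp⟩
    | succ j =>
      apply List.mem_append_right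
      have := ih (k + 1) j r (by simpa using Nat.lt_of_succ_lt_succ hj) hr
      have harith : k + 1 + j = k + (j + 1) := by omega
      simpa [harith] using this

-- A, written as the writes-list fold
lemma A_eq_writes (blocks chiave : List Int) (h : chiave ≠ []) :
    inverse_transpose_blocks blocks chiave
      = (writesFrom blocks chiave.length (blocks.length / chiave.length) 0
          (ordina_chiave chiave.length chiave)).foldl
          (fun acc p => acc.set p.1 p.2)
          (List.replicate ((blocks.length / chiave.length) * chiave.length) 0) := by
  simp only [inverse_transpose_blocks, if_neg h]
  have h0 : (0 : Nat) = 0 * (blocks.length / chiave.length) := by simp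
  conv_lhs => rw [h0]
  rw [outer_fold]

-- A elementwise
lemma A_getD (blocks chiave : List Int) (h : chiave ≠ []) (j r : Nat)
    (hj : j < (ordina_chiave chiave.length chiave).length)
    (hr : r < blocks.length / chiave.length) :
    (inverse_transpose_blocks blocks chiave).getD
      (r * chiave.length + (ordina_chiave chiave.length chiave)[j]) 0
    = blocks.getD (j * (blocks.length / chiave.length) + r) 0 := by
  set n := chiave.length
  set m := blocks.length / n
  set ord := ordina_chiave n chiave with hord
  have hn : 0 < n := List.length_pos_iff.mpr h
  rw [A_eq_writes blocks chiave h]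
  apply foldl_set_getD_mem
  · have := mem_writesFrom blocks n m ord 0 j r hj hr
    simpa using this
  · rw [map_fst_writesFrom]
    exact nodup_fsts n m hn ord (ordina_nodup n chiave)
      (fun c hc => ordina_mem n chiave hc)
  · rw [List.length_replicate]
    have hcn : ord[j] < n := ordina_mem n chiave (List.getElem_mem hj)
    calc r * n + ord[j] < r * n + n := by omega
    _ = (r + 1) * n := by ring
    _ ≤ m * n := Nat.mul_le_mul_right n hr

lemma A_length (blocks chiave : List Int) (h : chiave ≠ []) :
    (inverse_transpose_blocks blocks chiave).length
      = (blocks.length / chiave.length) * chiave.length := by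
  rw [A_eq_writes blocks chiave h, foldl_set_length, List.length_replicate]

-- B-side: the grid is the scattered per-column chunks
lemma ordina_eq (n : Nat) (chiave : List Int) :
    (PySem.List.sorted ((List.range n).map (fun i => (chiave.getD i 0, i))) Prod.fst).map Prod.snd
      = ordina_chiave n chiave := rfl

lemma grid_spec (blocks : List Int) (ord : List Nat) (n m j : Nat) (hj : j < ord.length)
    (hnd : ord.Nodup) (hord : ∀ c ∈ ord, c < n) :
    ((PySem.List.enumerate ord).foldl
      (fun (g : List (List Int)) jc =>
        g.set jc.2 (PySem.List.slice blocks (some (jc.1 * (m : Int))) (some ((jc.1 + 1) * (m : Int)))))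
      (List.replicate n ([] : List Int))).getD ord[j] []
    = (blocks.drop (j * m)).take m := by
  have hfold : (PySem.List.enumerate ord).foldl
      (fun (g : List (List Int)) jc =>
        g.set jc.2 (PySem.List.slice blocks (some (jc.1 * (m : Int))) (some ((jc.1 + 1) * (m : Int)))))
      (List.replicate n ([] : List Int))
    = (((PySem.List.enumerate ord).map
        (fun jc : Int × Nat =>
          (jc.2, PySem.List.slice blocks (some (jc.1 * (m : Int))) (some ((jc.1 + 1) * (m : Int)))))).foldl
        (fun acc p => acc.set p.1 p.2) (List.replicate n ([] : List Int))) := by rw [List.foldl_map]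
  rw [hfold]
  have hv : PySem.List.slice blocks (some ((j : Int) * (m : Int))) (some (((j : Int) + 1) * (m : Int)))
      = (blocks.drop (j * m)).take m := by
    have e1 : ((j : Int) * (m : Int)) = ((j * m : Nat) : Int) := by push_cast; ring
    have e2 : (((j : Int) + 1) * (m : Int)) = ((j * m + m : Nat) : Int) := by push_cast; ring
    rw [e1, e2, PySem.List.slice_natCast]
    congr 1
    omega
  rw [← hv]
  apply foldl_set_getD_mem
  · refine List.mem_map.mpr ⟨((j : Int), ord[j]), ?_, rfl⟩
    rw [PySem.List.mem_enumerate_iff]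
    exact ⟨j, hj, by simp⟩
  · have hfst : (((PySem.List.enumerate ord).map
        (fun jc : Int × Nat =>
          (jc.2, PySem.List.slice blocks (some (jc.1 * (m : Int))) (some ((jc.1 + 1) * (m : Int)))))).map
        Prod.fst) = ord := by
      rw [List.map_map]
      exact PySem.List.map_snd_enumerate ord 0
    rw [hfst]
    exact hnd
  · simpa using hord _ (List.getElem_mem hj)

-- generic flatten lemmas
lemma flat_length (m n : Nat) (f : Nat → Nat → Int) :
    ((List.range m).flatMap (fun r => (List.range n).map (f r))).length = m * n := by
  rw [List.length_flatMap]
  simp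

lemma flat_getD (n : Nat) (f : Nat → Nat → Int) :
    ∀ (m r c : Nat), r < m → c < n →
    ((List.range m).flatMap (fun r => (List.range n).map (f r))).getD (r * n + c) 0 = f r c := by
  intro m
  induction m with
  | zero => intro r c hr; omega
  | succ m ih =>
    intro r c hr hc
    rw [List.range_succ, List.flatMap_append]
    by_cases hrm : r < m
    · rw [List.getD, List.getElem?_append_left, ← List.getD]
      · exact ih r c hrm hc
      · rw [flat_length]
        calc r * n + c < r * n + n := by omega
        _ = (r + 1) * n := by ring
        _ ≤ m * n := Nat.mul_le_mul_right n hrm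
    · have hrm' : r = m := by omega
      subst hrm'
      rw [List.getD, List.getElem?_append_right (by rw [flat_length]; exact Nat.le_add_right _ _)]
      rw [flat_length, Nat.add_sub_cancel_left]
      simp [List.getElem?_map, List.getElem?_range hc]

lemma flat_getD' (n m : Nat) (G : List (List Int)) (r c : Nat) (hr : r < m) (hc : c < n) :
    ((List.range m).flatMap
      (fun r => (List.range n).map (fun col => (G.getD col []).getD r 0))).getD (r * n + c) 0
    = (G.getD c []).getD r 0 :=
  flat_getD n _ m r c hr hc

lemma flat_length' (n m : Nat) (G : List (List Int)) :
    ((List.range m).flatMap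
      (fun r => (List.range n).map (fun col => (G.getD col []).getD r 0))).length = m * n :=
  flat_length m n _

lemma take_drop_getD (blocks : List Int) (a m r : Nat) (hr : r < m) :
    ((blocks.drop a).take m).getD r 0 = blocks.getD (a + r) 0 := by
  rw [List.getD, List.getD, List.getElem?_take, if_pos hr, List.getElem?_drop]

lemma B_getD (blocks chiave : List Int) (h : chiave ≠ []) (j r : Nat)
    (hj : j < (ordina_chiave chiave.length chiave).length)
    (hr : r < blocks.length / chiave.length) :
    (inverse_transpose_blocks_alt blocks chiave).getD
      (r * chiave.length + (ordina_chiave chiave.length chiave)[j]) 0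
    = blocks.getD (j * (blocks.length / chiave.length) + r) 0 := by
  have hc : (ordina_chiave chiave.length chiave)[j] < chiave.length :=
    ordina_mem _ chiave (List.getElem_mem hj)
  simp only [inverse_transpose_blocks_alt, if_neg h]
  rw [ordina_eq]
  rw [flat_getD' chiave.length (blocks.length / chiave.length) _ r _ hr hc]
  rw [grid_spec blocks (ordina_chiave chiave.length chiave) chiave.length
      (blocks.length / chiave.length) j hj (ordina_nodup _ chiave)
      (fun c hcm => ordina_mem _ chiave hcm)]
  exact take_drop_getD blocks _ _ r hr

lemma B_length (blocks chiave : List Int) (h : chiave ≠ []) :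
    (inverse_transpose_blocks_alt blocks chiave).length
      = (blocks.length / chiave.length) * chiave.length := by
  simp only [inverse_transpose_blocks_alt, if_neg h]
  exact flat_length' chiave.length (blocks.length / chiave.length) _

-- ===== VERDICT (by name: the statement is the Claim_ definition above) =====
theorem inverse_transpose_blocks_spec : Claim_equal_inverse_transpose_blocks := by
  intro blocks chiave _
  unfold Spec_inverse_transpose_blocks
  by_cases h : chiave = []
  · subst h
    simp [inverse_transpose_blocks, inverse_transpose_blocks_alt]
  · have hn : 0 < chiave.length := List.length_pos_iff.mpr h
    have hlenA := A_length blocks chiave h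
    have hlenB := B_length blocks chiave h
    apply List.ext_getElem (by rw [hlenA, hlenB])
    intro i h1 h2
    have hi : i < (blocks.length / chiave.length) * chiave.length := hlenA ▸ h1
    have hc : i % chiave.length < chiave.length := Nat.mod_lt _ hn
    have hr : i / chiave.length < blocks.length / chiave.length :=
      (Nat.div_lt_iff_lt_mul hn).mpr hi
    have hi' : (i / chiave.length) * chiave.length + i % chiave.length = i := by
      rw [Nat.mul_comm]
      exact Nat.div_add_mod i chiave.length
    have hmem : i % chiave.length ∈ ordina_chiave chiave.length chiave :=
      (ordina_perm _ _).mem_iff.mpr (List.mem_range.mpr hc)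
    obtain ⟨j, hj, hcj⟩ := List.getElem_of_mem hmem
    rw [← List.getD_eq_getElem (inverse_transpose_blocks blocks chiave) 0 h1,
        ← List.getD_eq_getElem (inverse_transpose_blocks_alt blocks chiave) 0 h2,
        ← hi', ← hcj,
        A_getD blocks chiave h j (i / chiave.length) hj hr,
        B_getD blocks chiave h j (i / chiave.length) hj hr]
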